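-- pv_equiv track=rewrite | github.com/pratikreddy9/switchboard | switchboard/collectors.py | _is_explicitly_excluded
-- ===== SOURCE A (Python) =====
-- def _is_explicitly_excluded(full_path: str, excludes: list[str]) -> bool:
--     normalized_full = str(full_path).replace("\\", "/").rstrip("/")
--     for pattern in excludes:
--         token = str(pattern).strip().replace("\\", "/").rstrip("/")
--         if not token or any(char in token for char in "*?["):
--             continue
--         normalized_token = token.lstrip("/")
--         normalized_full_cmp = normalized_full.lstrip("/")
--         if normalized_full_cmp == normalized_token:
--             return True
--         if normalized_full_cmp.startswith(normalized_token + "/"):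
--             return True
--     return False
-- ===== SOURCE B (Python) =====
-- def _is_explicitly_excluded(full_path: str, excludes: list[str]) -> bool:
--     tokens = set()
--     for pattern in excludes:
--         token = str(pattern).strip().replace("\\", "/").rstrip("/")
--         if token and not any(c in token for c in "*?["):
--             tokens.add(token.lstrip("/"))
--     cmp = str(full_path).replace("\\", "/").rstrip("/").lstrip("/")
--     prefix = ""
--     for ch in cmp:
--         if ch == "/":
--             if prefix in tokens:
--                 return True
--         prefix += ch
--     return prefix in tokens
-- ===== Notes on version B (the rewrite author's own statement) =====
-- stated objective: alternative
-- what changed: B builds the set of normalized exclude tokens once, then makes a single left-to-right scan over the normalized path testing each '/'-boundary prefix for set membership, instead of A's per-pattern equality/startswith scan.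
import Mathlib
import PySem

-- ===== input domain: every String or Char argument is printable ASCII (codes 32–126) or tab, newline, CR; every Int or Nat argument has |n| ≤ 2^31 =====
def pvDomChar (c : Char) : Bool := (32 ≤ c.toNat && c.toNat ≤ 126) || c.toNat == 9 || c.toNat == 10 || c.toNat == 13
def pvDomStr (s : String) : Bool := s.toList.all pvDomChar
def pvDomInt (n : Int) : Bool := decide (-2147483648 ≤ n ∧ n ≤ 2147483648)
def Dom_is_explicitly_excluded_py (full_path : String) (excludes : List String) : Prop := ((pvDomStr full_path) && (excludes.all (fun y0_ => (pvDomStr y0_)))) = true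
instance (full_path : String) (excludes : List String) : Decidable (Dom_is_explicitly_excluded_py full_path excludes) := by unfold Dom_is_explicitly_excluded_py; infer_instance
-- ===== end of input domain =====

-- B replaces A's per-pattern equality/startswith scan by one set of normalized tokens plus a single
-- left-to-right walk over the normalized path testing each '/'-boundary prefix (objective: alternative).

-- ===== PORT A =====
-- s.rstrip("/") / s.lstrip("/"): hand ports, exact for the single strip character '/'
def pvRstripSlash (cs : List Char) : List Char := (cs.reverse.dropWhile (· == '/')).reverse
def pvLstripSlash (cs : List Char) : List Char := cs.dropWhile (· == '/')
-- token = str(pattern).strip().replace("\\", "/").rstrip("/")  (identical line in A and in B)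
def pvNormTok (pattern : String) : List Char :=
  pvRstripSlash (PySem.Chars.replace (PySem.Chars.strip pattern.toList) ['\\'] ['/'])
-- any(char in token for char in "*?[")  (identical line in A and in B)
def pvHasGlob (token : List Char) : Bool := ['*', '?', '['].any (fun c => PySem.Chars.isIn [c] token)

-- the 'for pattern in excludes' loop of A, with early return
def pvAGo (normalized_full : List Char) : List String → Bool
  | [] => false
  | pattern :: rest =>
    let token := pvNormTok pattern
    if token = [] ∨ pvHasGlob token = true then pvAGo normalized_full rest
    else
      let normalized_token := pvLstripSlash token
      let normalized_full_cmp := pvLstripSlash normalized_full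
      if normalized_full_cmp = normalized_token then true
      else if PySem.Chars.startswith normalized_full_cmp (normalized_token ++ ['/']) then true
      else pvAGo normalized_full rest

def is_explicitly_excluded_py (full_path : String) (excludes : List String) : Bool :=
  pvAGo (pvRstripSlash (PySem.Chars.replace full_path.toList ['\\'] ['/'])) excludes

-- ===== PORT B =====
-- first loop of B: build the set of normalized tokens
def pvBTokens (excludes : List String) : PySem.Set (List Char) :=
  excludes.foldl
    (fun tokens pattern =>
      let token := pvNormTok pattern
      if token = [] ∨ pvHasGlob token = true then tokens
      else PySem.Set.add tokens (pvLstripSlash token))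
    PySem.Set.empty

-- second loop of B: walk the path characters, testing the running prefix at each '/'
def pvBWalk (tokens : PySem.Set (List Char)) (pre : List Char) : List Char → Bool
  | [] => tokens.contains pre
  | c :: rest =>
    if c = '/' then
      if tokens.contains pre then true else pvBWalk tokens (pre ++ [c]) rest
    else pvBWalk tokens (pre ++ [c]) rest

def is_explicitly_excluded_py_alt (full_path : String) (excludes : List String) : Bool :=
  let tokens := pvBTokens excludes
  let cmp := pvLstripSlash (pvRstripSlash (PySem.Chars.replace full_path.toList ['\\'] ['/']))
  pvBWalk tokens [] cmp

-- ===== PRECONDITION & SPEC =====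
def Spec_is_explicitly_excluded_py (full_path : String) (excludes : List String) (out : Bool) : Prop := out = is_explicitly_excluded_py_alt full_path excludes
instance (full_path : String) (excludes : List String) (out : Bool) : Decidable (Spec_is_explicitly_excluded_py full_path excludes out) := by unfold Spec_is_explicitly_excluded_py; infer_instance

-- ===== CLAIM (what is proved, stated in full; the proofs are below) =====
def Claim_equal_is_explicitly_excluded_py : Prop := ∀ (full_path : String) (excludes : List String), Dom_is_explicitly_excluded_py full_path excludes → Spec_is_explicitly_excluded_py full_path excludes (is_explicitly_excluded_py full_path excludes)

-- ===== LEMMAS AND PROOFS =====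

-- a pattern survives A's (and B's) filter
def pvGood (pattern : String) : Prop :=
  ¬ (pvNormTok pattern = [] ∨ pvHasGlob (pvNormTok pattern) = true)

-- A's loop is an existential over patterns
theorem pvAGo_iff (nf : List Char) (pats : List String) :
    pvAGo nf pats = true ↔
      ∃ p ∈ pats, pvGood p ∧
        (pvLstripSlash nf = pvLstripSlash (pvNormTok p) ∨
          (pvLstripSlash (pvNormTok p) ++ ['/']) <+: pvLstripSlash nf) := by
  induction pats with
  | nil => simp [pvAGo]
  | cons p rest ih =>
    simp only [pvAGo]
    by_cases hg : pvNormTok p = [] ∨ pvHasGlob (pvNormTok p) = true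
    · simp only [if_pos hg, ih]
      constructor
      · rintro ⟨q, hq, h⟩; exact ⟨q, List.mem_cons_of_mem _ hq, h⟩
      · rintro ⟨q, hq, h⟩
        rcases List.mem_cons.mp hq with rfl | hq'
        · exact absurd hg h.1
        · exact ⟨q, hq', h⟩
    · simp only [if_neg hg]
      by_cases he : pvLstripSlash nf = pvLstripSlash (pvNormTok p)
      · simp only [if_pos he, true_iff]
        exact ⟨p, List.mem_cons_self, hg, Or.inl he⟩
      · simp only [if_neg he]
        by_cases hs : PySem.Chars.startswith (pvLstripSlash nf) (pvLstripSlash (pvNormTok p) ++ ['/']) = true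
        · simp only [if_pos hs, true_iff]
          exact ⟨p, List.mem_cons_self, hg, Or.inr ((PySem.Chars.startswith_iff _ _).mp hs)⟩
        · simp only [if_neg hs, ih]
          constructor
          · rintro ⟨q, hq, h⟩; exact ⟨q, List.mem_cons_of_mem _ hq, h⟩
          · rintro ⟨q, hq, h⟩
            rcases List.mem_cons.mp hq with rfl | hq'
            · rcases h.2 with h2 | h2
              · exact absurd h2 he
              · exact absurd ((PySem.Chars.startswith_iff _ _).mpr h2) hs
            · exact ⟨q, hq', h⟩

-- membership in B's token set
theorem pvBTokens_mem (excl : List String) (x : List Char) :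
    x ∈ pvBTokens excl ↔ ∃ p ∈ excl, pvGood p ∧ x = pvLstripSlash (pvNormTok p) := by
  have key : ∀ (l : List String) (s : PySem.Set (List Char)),
      x ∈ l.foldl
        (fun tokens pattern =>
          let token := pvNormTok pattern
          if token = [] ∨ pvHasGlob token = true then tokens
          else PySem.Set.add tokens (pvLstripSlash token)) s ↔
        x ∈ s ∨ ∃ p ∈ l, pvGood p ∧ x = pvLstripSlash (pvNormTok p) := by
    intro l
    induction l with
    | nil => simp
    | cons p rest ih =>
      intro s
      simp only [List.foldl_cons]
      by_cases hg : pvNormTok p = [] ∨ pvHasGlob (pvNormTok p) = true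
      · simp only [if_pos hg, ih]
        constructor
        · rintro (h | ⟨q, hq, h⟩)
          · exact Or.inl h
          · exact Or.inr ⟨q, List.mem_cons_of_mem _ hq, h⟩
        · rintro (h | ⟨q, hq, h⟩)
          · exact Or.inl h
          · rcases List.mem_cons.mp hq with rfl | hq'
            · exact absurd hg h.1
            · exact Or.inr ⟨q, hq', h⟩
      · simp only [if_neg hg, ih, PySem.Set.mem_add]
        constructor
        · rintro ((h | h) | ⟨q, hq, h⟩)
          · exact Or.inl h
          · exact Or.inr ⟨p, List.mem_cons_self, hg, h⟩
          · exact Or.inr ⟨q, List.mem_cons_of_mem _ hq, h⟩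
        · rintro (h | ⟨q, hq, h⟩)
          · exact Or.inl (Or.inl h)
          · rcases List.mem_cons.mp hq with rfl | hq'
            · exact Or.inl (Or.inr h.2)
            · exact Or.inr ⟨q, hq', h⟩
  rw [pvBTokens, key]
  simp [PySem.Set.empty]

-- B's walk tests exactly the '/'-boundary prefixes of pre ++ cs that extend pre
theorem pvBWalk_iff (t : PySem.Set (List Char)) (cs : List Char) : ∀ (pre : List Char),
    pvBWalk t pre cs = true ↔
      ∃ u, (u = cs ∨ (u ++ ['/']) <+: cs) ∧ t.contains (pre ++ u) = true := by
  induction cs with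
  | nil =>
    intro pre
    simp only [pvBWalk]
    constructor
    · intro h; exact ⟨[], Or.inl rfl, by simpa using h⟩
    · rintro ⟨u, hu | hu, hc⟩
      · subst hu; simpa using hc
      · simp [List.prefix_nil] at hu
  | cons c rest ih =>
    intro pre
    by_cases hc : c = '/'
    · subst hc
      simp only [pvBWalk]
      rw [if_pos trivial]
      by_cases hp : t.contains pre = true
      · rw [if_pos hp]
        simp only [true_iff]
        exact ⟨[], Or.inr (by simp), by simpa using hp⟩
      · rw [if_neg hp, ih]
        constructor
        · rintro ⟨u, hu, hc'⟩
          refine ⟨'/' :: u, ?_, by simpa using hc'⟩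
          rcases hu with rfl | hu
          · exact Or.inl rfl
          · exact Or.inr (by simpa [List.cons_prefix_cons] using hu)
        · rintro ⟨u, hu, hc'⟩
          cases u with
          | nil =>
            exact absurd (by simpa using hc') hp
          | cons c' u' =>
            rcases hu with hu | hu
            · injection hu with h1 h2
              exact ⟨u', Or.inl h2, by subst h1; simpa using hc'⟩
            · obtain ⟨h1, h2⟩ := List.cons_prefix_cons.mp hu
              exact ⟨u', Or.inr h2, by subst h1; simpa using hc'⟩
    · simp only [pvBWalk]
      rw [if_neg hc, ih]
      constructor
      · rintro ⟨u, hu, hc'⟩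
        refine ⟨c :: u, ?_, by simpa using hc'⟩
        rcases hu with rfl | hu
        · exact Or.inl rfl
        · exact Or.inr (by simpa [List.cons_prefix_cons] using hu)
      · rintro ⟨u, hu, hc'⟩
        cases u with
        | nil =>
          rcases hu with hu | hu
          · simp at hu
          · obtain ⟨h1, _⟩ := List.cons_prefix_cons.mp hu
            exact absurd h1.symm hc
        | cons c' u' =>
          rcases hu with hu | hu
          · injection hu with h1 h2
            exact ⟨u', Or.inl h2, by subst h1; simpa using hc'⟩
          · obtain ⟨h1, h2⟩ := List.cons_prefix_cons.mp hu
            exact ⟨u', Or.inr h2, by subst h1; simpa using hc'⟩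

theorem pvContains_iff (t : PySem.Set (List Char)) (x : List Char) :
    t.contains x = true ↔ x ∈ t := by
  simp [PySem.Set.contains]

-- ===== VERDICT (by name: the statement is the Claim_ definition above) =====
theorem is_explicitly_excluded_py_spec : Claim_equal_is_explicitly_excluded_py := by
  intro full_path excludes _
  unfold Spec_is_explicitly_excluded_py
  rw [Bool.eq_iff_iff]
  unfold is_explicitly_excluded_py is_explicitly_excluded_py_alt
  rw [pvAGo_iff, pvBWalk_iff]
  constructor
  · rintro ⟨p, hp, hg, hm⟩
    refine ⟨pvLstripSlash (pvNormTok p), ?_, ?_⟩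
    · rcases hm with hm | hm
      · exact Or.inl hm.symm
      · exact Or.inr hm
    · simp only [List.nil_append]
      exact (pvContains_iff _ _).mpr ((pvBTokens_mem _ _).mpr ⟨p, hp, hg, rfl⟩)
  · rintro ⟨u, hu, hc⟩
    simp only [List.nil_append] at hc
    obtain ⟨p, hp, hg, rfl⟩ := (pvBTokens_mem _ _).mp ((pvContains_iff _ _).mp hc)
    refine ⟨p, hp, hg, ?_⟩
    rcases hu with hu | hu
    · exact Or.inl hu.symm
    · exact Or.inr hu
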